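-- pv_equiv track=rewrite | github.com/jarodsmdev/CodeHub | ventaPasajesVuelos/VentasPasajesVuelos.py | crearAsientos
-- ===== SOURCE A (Python) =====
-- def crearAsientos(nFilas: int, nColumnas: int) -> list:
--     """
--     Función que crea una matriz de asientos para un avión
--
--     Args:
--         nFilas (int): Número de filas de asientos
--         nColumnas (int): Número de columnas de asientos
--
--     Returns:
--         list: Matriz de asientos con números correlativos
--     """
--     asientos = []  # Crear una lista vacía para almacenar las filas de asientos
--     asiento_numero = 1  # Iniciar el contador de asientos desde 1
--     for fila in range(nFilas):
--         lista_filas = []  # Crear una lista vacía para representar una fila de asientos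
--         for col_index in range(nColumnas):
--             lista_filas.append(asiento_numero)  # Asignar el número correlativo al asiento
--             asiento_numero += 1  # Incrementar el contador de asientos
--         asientos.append(lista_filas)  # Agregar la fila completa a la matriz de asientos
--
--     return asientos  # Devolver la matriz completa de asientos
-- ===== SOURCE B (Python) =====
-- def crearAsientos(nFilas: int, nColumnas: int) -> list:
--     # B: two staged passes instead of nested counting loops — materialise the
--     # whole flat run 1..filas*cols in one go with range, then cut it into rows
--     # by slicing.
--     filas = max(nFilas, 0)
--     cols = max(nColumnas, 0)
--     flat = list(range(1, filas * cols + 1))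
--     return [flat[i * cols : i * cols + cols] for i in range(filas)]
-- ===== Notes on version B (the rewrite author's own statement) =====
-- stated objective: alternative
-- what changed: Replaced the nested loops threading a running seat counter by two staged passes: build the entire flat sequence 1..filas*cols once with range, then cut it into rows by slicing.
import Mathlib
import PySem

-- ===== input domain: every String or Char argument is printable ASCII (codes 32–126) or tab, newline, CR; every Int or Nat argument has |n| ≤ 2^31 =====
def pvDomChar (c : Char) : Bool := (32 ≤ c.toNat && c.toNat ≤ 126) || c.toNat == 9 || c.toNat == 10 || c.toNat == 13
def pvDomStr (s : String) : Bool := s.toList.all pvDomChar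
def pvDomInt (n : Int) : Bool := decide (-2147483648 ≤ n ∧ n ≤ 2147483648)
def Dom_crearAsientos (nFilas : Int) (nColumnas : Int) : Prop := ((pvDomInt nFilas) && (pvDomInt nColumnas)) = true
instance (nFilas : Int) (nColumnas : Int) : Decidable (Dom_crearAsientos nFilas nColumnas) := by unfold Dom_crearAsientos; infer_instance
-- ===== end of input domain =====

-- B builds the flat run 1..filas*cols in one pass and then splits it into rows
-- by repeated slicing, instead of A's nested loops with a running counter
-- (objective: alternative).


-- ===== PORT A =====
-- Literal transliteration: fold over range(nFilas) carrying (asientos, asiento_numero);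
-- inner fold over range(nColumnas) appends the counter and increments it.
def crearAsientos (nFilas : Int) (nColumnas : Int) : List (List Int) :=
  let res := (PySem.List.pyRange 0 nFilas 1).foldl
    (fun (st : List (List Int) × Int) _fila =>
      let inner := (PySem.List.pyRange 0 nColumnas 1).foldl
        (fun (st2 : List Int × Int) _col => (st2.1 ++ [st2.2], st2.2 + 1))
        (([] : List Int), st.2)
      (st.1 ++ [inner.1], inner.2))
    (([] : List (List Int)), 1)
  res.1

-- ===== PORT B =====
-- Staged: flat = list(range(1, filas*cols+1)); then rows are the slices
-- flat[i*cols : i*cols+cols] (PySem.List.slice is exact for these).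
def crearAsientos_alt (nFilas : Int) (nColumnas : Int) : List (List Int) :=
  let filas := max nFilas 0
  let cols := max nColumnas 0
  let flat := PySem.List.pyRange 1 (filas * cols + 1) 1
  (PySem.List.pyRange 0 filas 1).map
    (fun i => PySem.List.slice flat (some (i * cols)) (some (i * cols + cols)))

-- ===== PRECONDITION & SPEC =====
def Spec_crearAsientos (nFilas : Int) (nColumnas : Int) (out : List (List Int)) : Prop := out = crearAsientos_alt nFilas nColumnas
instance (nFilas : Int) (nColumnas : Int) (out : List (List Int)) : Decidable (Spec_crearAsientos nFilas nColumnas out) := by unfold Spec_crearAsientos; infer_instance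

-- ===== CLAIM (what is proved, stated in full; the proofs are below) =====
def Claim_equal_crearAsientos : Prop := ∀ (nFilas : Int) (nColumnas : Int), Dom_crearAsientos nFilas nColumnas → Spec_crearAsientos nFilas nColumnas (crearAsientos nFilas nColumnas)

-- ===== LEMMAS AND PROOFS =====

-- A's inner loop: appends s, s+1, … and advances the counter by the length.
theorem pv_inner (l : List Int) (acc : List Int) (s : Int) :
    l.foldl (fun (st2 : List Int × Int) _ => (st2.1 ++ [st2.2], st2.2 + 1)) (acc, s)
      = (acc ++ (List.range l.length).map (fun j : Nat => s + (j : Int)),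
         s + (l.length : Int)) := by
  induction l generalizing acc s with
  | nil => simp
  | cons x xs ih =>
      simp only [List.foldl_cons, ih, List.length_cons, Prod.mk.injEq]
      refine ⟨?_, by push_cast; ring⟩
      rw [List.range_succ_eq_map]
      simp only [List.map_cons, List.map_map, Nat.cast_zero, add_zero, List.append_assoc,
        List.singleton_append]
      congr 2
      apply List.map_congr_left
      intro j _
      simp only [Function.comp_apply]
      push_cast; ring

-- A's outer loop: each step appends one row of L consecutive numbers starting
-- at the counter and advances the counter by L.
theorem pv_outer (l : List Int) (L : Nat) (acc : List (List Int)) (s : Int) :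
    l.foldl
      (fun (st : List (List Int) × Int) _ =>
        (st.1 ++ [(List.range L).map (fun j : Nat => st.2 + (j : Int))],
         st.2 + (L : Int)))
      (acc, s)
      = (acc ++ (List.range l.length).map
            (fun i : Nat => (List.range L).map
              (fun j : Nat => s + (i : Int) * (L : Int) + (j : Int))),
         s + (l.length : Int) * (L : Int)) := by
  induction l generalizing acc s with
  | nil => simp
  | cons x xs ih =>
      rw [List.foldl_cons, ih]
      simp only [List.length_cons, Prod.mk.injEq]
      refine ⟨?_, by push_cast; ring⟩
      rw [List.range_succ_eq_map]
      simp only [List.map_cons, List.map_map, Nat.cast_zero, List.append_assoc,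
        List.singleton_append]
      congr 2
      · apply List.map_congr_left; intro j _; ring
      · apply List.map_congr_left
        intro i _
        simp only [Function.comp_apply]
        apply List.map_congr_left
        intro j _
        push_cast; ring

-- ===== VERDICT (by name: the statement is the Claim_ definition above) =====
theorem crearAsientos_spec : Claim_equal_crearAsientos := by
  intro R C _
  show crearAsientos R C = crearAsientos_alt R C
  unfold crearAsientos crearAsientos_alt
  simp only [pv_inner, List.nil_append]
  rw [pv_outer]
  rw [PySem.List.pyRange_one 0 R, PySem.List.pyRange_one 0 C,
      PySem.List.pyRange_one 0 (max R 0), PySem.List.pyRange_one 1 (max R 0 * max C 0 + 1)]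
  simp only [List.map_map, List.length_map, List.length_range, Int.sub_zero,
    List.nil_append]
  have hc0 : (0 : Int) ≤ max C 0 := le_max_right _ _
  have hRt : (max R 0).toNat = R.toNat := by omega
  have hCt : (max C 0).toNat = C.toNat := by omega
  have hmax : max R 0 * max C 0 + 1 - 1 = max R 0 * max C 0 := by ring
  have hFC : (max R 0 * max C 0).toNat = R.toNat * C.toNat := by
    rw [Int.toNat_mul (le_max_right _ _) (le_max_right _ _), hRt, hCt]
  rw [hmax, hRt, hFC]
  apply List.map_congr_left
  intro i hi
  rw [List.mem_range] at hi
  simp only [Function.comp_apply, zero_add]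
  -- turn B's row slice into take/drop
  have ha : (0 : Int) ≤ (i : Int) * max C 0 := mul_nonneg (Int.natCast_nonneg i) hc0
  rw [PySem.List.slice_toNat _ ha (by linarith)]
  have hat : ((i : Int) * max C 0).toNat = i * C.toNat := by
    rw [Int.toNat_mul (Int.natCast_nonneg i) hc0, Int.toNat_natCast, hCt]
  have hbt : ((i : Int) * max C 0 + max C 0).toNat = i * C.toNat + C.toNat := by
    rw [Int.toNat_add ha hc0, hat, hCt]
  rw [hat, hbt, Nat.add_sub_cancel_left]
  -- both rows have length C.toNat; compare elementwise
  apply List.ext_getElem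
  · simp only [List.length_map, List.length_range, List.length_take, List.length_drop]
    have h1 : i * C.toNat + C.toNat ≤ R.toNat * C.toNat := by
      have : (i + 1) * C.toNat ≤ R.toNat * C.toNat :=
        Nat.mul_le_mul_right _ (by omega)
      calc i * C.toNat + C.toNat = (i + 1) * C.toNat := by ring
        _ ≤ R.toNat * C.toNat := this
    omega
  · intro j hj1 hj2
    simp only [List.length_map, List.length_range] at hj1
    rw [List.getElem_map, List.getElem_range,
        List.getElem_take, List.getElem_drop, List.getElem_map, List.getElem_range]
    rcases le_or_gt C 0 with hC | hC
    · omega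
    · have : ((C.toNat : Int)) = C := Int.toNat_of_nonneg hC.le
      push_cast [this]
      ring
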